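-- pv_equiv track=rewrite | github.com/mkafker/PokerBot | matt/my_bot.py | player_money_bet
-- ===== SOURCE A (Python) =====
-- def extract_actions(single_history):
--     """
--     Takes a single string of history (no /) and
--     returns a list of actions in a form such as
--     ['c', '1r', '10r', 'f']
--     """
--     actions = []
--     current_action = ''
--     for item in single_history:
--         if item in ['a', 'c', 'f']:
--             actions.append(item)
--             current_action = ''
--         elif item.isdigit():
--             current_action += item
--         elif item == 'r':
--             actions.append(current_action + item)
--             current_action = ''
--     return actions
--
-- def player_money_bet(action_history):
--     """
--     Returns the amount of money p1 and p2 have bet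
--     (not including the antee) with the format of p1, p2.
--     Assumes that player 1 always moves first for each betting round.
--     """
--     p1_commited = 0
--     p2_commited = 0
--     for history in action_history:
--         p1_temp = 0
--         p2_temp = 0
--         for key, action in enumerate(extract_actions(history)):
--             if key % 2 == 0:
--                 if action == 'c':
--                     p1_temp = p2_temp
--                 elif 'r' in action:
--                     p1_temp = p2_temp + int(action.replace('r', ''))
--                 elif action == 'a':
--                     p1_temp += 1
--             else:
--                 if action == 'c':
--                     p2_temp = p1_temp
--                 elif 'r' in action:
--                     p2_temp = p1_temp + int(action.replace('r', ''))
--                 elif action == 'a':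
--                     p2_temp += 1
--         p1_commited += p1_temp
--         p2_commited += p2_temp
--
--     return p1_commited, p2_commited
-- ===== SOURCE B (Python) =====
-- def player_money_bet(action_history):
--     """
--     Returns the amount of money p1 and p2 have bet
--     (not including the antee) with the format of p1, p2.
--     Single fused pass over each history string: no intermediate action list;
--     a 2-element table indexed by whose turn it is replaces the even/odd branches.
--     """
--     p1_commited = 0
--     p2_commited = 0
--     for history in action_history:
--         t = [0, 0]   # t[0] = p1's money this round, t[1] = p2's
--         turn = 0     # index of the player to act
--         val = 0      # numeric value of the pending run of digits
--         for ch in history: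
--             if ch == 'a':
--                 t[turn] += 1
--                 turn = 1 - turn
--                 val = 0
--             elif ch == 'c':
--                 t[turn] = t[1 - turn]
--                 turn = 1 - turn
--                 val = 0
--             elif ch == 'f':
--                 turn = 1 - turn
--                 val = 0
--             elif ch == 'r':
--                 t[turn] = t[1 - turn] + val
--                 turn = 1 - turn
--                 val = 0
--             elif ch.isdigit():
--                 val = val * 10 + int(ch)
--         p1_commited += t[0]
--         p2_commited += t[1]
--     return p1_commited, p2_commited
-- ===== Notes on version B (the rewrite author's own statement) =====
-- stated objective: alternative
-- what changed: Fuses A's two passes (extract_actions tokeniser, then an enumerate/parity accumulator) into one character pass per history string: a pending-digit value and a turn index replace the intermediate token list, int() reparsing and the even/odd branches.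
import Mathlib
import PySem

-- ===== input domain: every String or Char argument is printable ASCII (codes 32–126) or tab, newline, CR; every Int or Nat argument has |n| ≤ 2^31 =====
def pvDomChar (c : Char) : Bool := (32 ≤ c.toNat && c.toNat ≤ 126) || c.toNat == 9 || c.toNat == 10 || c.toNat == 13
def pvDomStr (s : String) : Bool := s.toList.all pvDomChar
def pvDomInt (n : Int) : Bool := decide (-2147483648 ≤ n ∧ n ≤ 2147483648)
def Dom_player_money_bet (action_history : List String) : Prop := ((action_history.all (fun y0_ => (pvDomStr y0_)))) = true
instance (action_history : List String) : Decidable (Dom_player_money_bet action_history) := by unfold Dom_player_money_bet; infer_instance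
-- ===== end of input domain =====

-- B fuses A's two passes (tokenise, then accumulate by parity) into one pass per string; equivalence is proved on Pre_ (no 'r' without pending digits, where A's int('') raises).

-- ===== PORT A =====

-- decimal value of a run of digit characters
def decVal (cs : List Char) : Int := cs.foldl (fun a c => 10 * a + ((c.toNat : Int) - 48)) 0

-- hand port of int(s) for the strings that reach A's single int() call site (action.replace('r','') = a
-- run of decimal digits, possibly empty): exact there — no sign/space/underscore can occur; none = ValueError
def pyIntDigits? (cs : List Char) : Option Int :=
  if cs ≠ [] ∧ cs.all PySem.Chars.isdigit then some (decVal cs) else none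

-- extract_actions' loop (strings are carried as their char lists, PySem.Chars-side)
def ea_go : List Char → List (List Char) → List Char → List (List Char)
  | [], actions, _cur => actions
  | c :: rest, actions, cur =>
    if c = 'a' ∨ c = 'c' ∨ c = 'f' then ea_go rest (actions ++ [[c]]) []
    else if PySem.Chars.isdigit c then ea_go rest actions (cur ++ [c])
    else if c = 'r' then ea_go rest (actions ++ [cur ++ [c]]) []
    else ea_go rest actions cur

def extract_actions (single_history : String) : List (List Char) :=
  ea_go single_history.toList [] []

-- the enumerate(...) loop of player_money_bet
def inner_go : List (List Char) → Nat → Int → Int → Int × Int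
  | [], _, p1t, p2t => (p1t, p2t)
  | a :: rest, key, p1t, p2t =>
    if key % 2 = 0 then
      if a = ['c'] then inner_go rest (key + 1) p2t p2t
      else if PySem.Chars.isIn ['r'] a then
        inner_go rest (key + 1) (p2t + (pyIntDigits? (PySem.Chars.replace a ['r'] [])).getD 0) p2t
      else if a = ['a'] then inner_go rest (key + 1) (p1t + 1) p2t
      else inner_go rest (key + 1) p1t p2t
    else
      if a = ['c'] then inner_go rest (key + 1) p1t p1t
      else if PySem.Chars.isIn ['r'] a then
        inner_go rest (key + 1) p1t (p1t + (pyIntDigits? (PySem.Chars.replace a ['r'] [])).getD 0)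
      else if a = ['a'] then inner_go rest (key + 1) p1t (p2t + 1)
      else inner_go rest (key + 1) p1t p2t

def player_money_bet (action_history : List String) : Int × Int :=
  action_history.foldl
    (fun acc history =>
      let t := inner_go (extract_actions history) 0 0 0
      (acc.1 + t.1, acc.2 + t.2))
    (0, 0)

-- ===== PORT B =====

-- one character of Source B's fused loop; state = ((t[0], t[1]), (turn, val))
def alt_step (st : (Int × Int) × Nat × Int) (ch : Char) : (Int × Int) × Nat × Int :=
  let t := st.1
  let turn := st.2.1
  let val := st.2.2
  if ch = 'a' then ((if turn = 0 then (t.1 + 1, t.2) else (t.1, t.2 + 1)), (1 - turn, 0))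
  else if ch = 'c' then ((if turn = 0 then (t.2, t.2) else (t.1, t.1)), (1 - turn, 0))
  else if ch = 'f' then (t, (1 - turn, 0))
  else if ch = 'r' then ((if turn = 0 then (t.2 + val, t.2) else (t.1, t.1 + val)), (1 - turn, 0))
  else if PySem.Chars.isdigit ch then (t, (turn, val * 10 + ((ch.toNat : Int) - 48)))  -- int(ch) for a digit character, exact
  else st

def player_money_bet_alt (action_history : List String) : Int × Int :=
  action_history.foldl
    (fun acc history =>
      let r := history.toList.foldl alt_step ((0, 0), (0, 0))
      (acc.1 + r.1.1, acc.2 + r.1.2))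
    (0, 0)

-- ===== PRECONDITION & SPEC =====

-- well-formedness scan of one history: hasd says whether a digit is pending; an 'r' with no pending digit is bad
def goodChars : List Char → Bool → Bool
  | [], _ => true
  | c :: rest, hasd =>
    if c = 'a' ∨ c = 'c' ∨ c = 'f' then goodChars rest false
    else if PySem.Chars.isdigit c then goodChars rest true
    else if c = 'r' then hasd && goodChars rest false
    else goodChars rest hasd

-- Pre_ excludes exactly the inputs where A raises ValueError: some history contains an 'r' token with no digits accumulated since the last a/c/f/r, so A calls int('').
def Pre_player_money_bet (action_history : List String) : Prop :=
  ∀ s ∈ action_history, goodChars s.toList false = true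
instance (action_history : List String) : Decidable (Pre_player_money_bet action_history) := by
  unfold Pre_player_money_bet; infer_instance

def pvWitness_player_money_bet : List String := ["c1r10rf", "a c", "12r3rc"]

def Spec_player_money_bet (action_history : List String) (out : Int × Int) : Prop :=
  out = player_money_bet_alt action_history
instance (action_history : List String) (out : Int × Int) : Decidable (Spec_player_money_bet action_history out) := by
  unfold Spec_player_money_bet; infer_instance

-- ===== CLAIM (what is proved, stated in full; the proofs are below) =====
def Claim_equal_player_money_bet : Prop :=
  ∀ (action_history : List String), Dom_player_money_bet action_history →
    Pre_player_money_bet action_history →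
    Spec_player_money_bet action_history (player_money_bet action_history)

-- ===== LEMMAS AND PROOFS =====

-- ea_go's action accumulator only grows at the back
lemma ea_go_acc (cs : List Char) : ∀ (acts : List (List Char)) (cur : List Char),
    ea_go cs acts cur = acts ++ ea_go cs [] cur := by
  induction cs with
  | nil => intro acts cur; simp [ea_go]
  | cons c rest ih =>
    intro acts cur
    simp only [ea_go]
    split_ifs with h1 h2 h3
    · rw [ih (acts ++ [[c]]), ih ([] ++ [[c]])]; simp
    · exact ih acts (cur ++ [c])
    · rw [ih (acts ++ [cur ++ [c]]), ih ([] ++ [cur ++ [c]])]; simp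
    · exact ih acts cur

lemma rgo_cons (c : Char) (t acc : List Char) (m : Nat) (hc : c ≠ 'r') :
    PySem.Chars.replace.go ['r'] [] (m + 1) (c :: t) acc = PySem.Chars.replace.go ['r'] [] m t (c :: acc) := by
  rw [PySem.Chars.replace.go.eq_def]
  have hp : ['r'].isPrefixOf (c :: t) = false := by
    simp [List.isPrefixOf]; intro h'; exact absurd h'.symm hc
  simp [hp]

lemma rgo_nil (acc : List Char) (m : Nat) :
    PySem.Chars.replace.go ['r'] [] m [] acc = acc.reverse := by
  rw [PySem.Chars.replace.go.eq_def]
  match m with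
  | 0 => simp
  | (k+1) => simp

lemma rgo_r (acc : List Char) (m : Nat) :
    PySem.Chars.replace.go ['r'] [] (m + 1) ['r'] acc = acc.reverse := by
  rw [PySem.Chars.replace.go.eq_def]
  have hp : ['r'].isPrefixOf ['r'] = true := by decide
  simp [hp]
  exact rgo_nil acc m

lemma replace_go_no_r (cur : List Char) (h : 'r' ∉ cur) :
    ∀ (fuel : Nat) (acc : List Char), cur.length + 1 ≤ fuel →
      PySem.Chars.replace.go ['r'] [] fuel (cur ++ ['r']) acc = acc.reverse ++ cur := by
  induction cur with
  | nil =>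
    intro fuel acc hf
    match fuel, hf with
    | (m+1), _ => simpa using rgo_r acc m
  | cons c t ih =>
    intro fuel acc hf
    match fuel, hf with
    | (m+1), hf =>
      have hc : c ≠ 'r' := fun hc => h (by simp [hc])
      rw [List.cons_append, rgo_cons c (t ++ ['r']) acc m hc]
      rw [ih (fun hm => h (by simp [hm])) m (c :: acc) (by simpa using hf)]
      simp

-- replace drops the final 'r' of a digit run
lemma replace_r (cur : List Char) (h : 'r' ∉ cur) :
    PySem.Chars.replace (cur ++ ['r']) ['r'] [] = cur := by
  rw [PySem.Chars.replace]
  simp only [List.isEmpty_cons, Bool.false_eq_true, if_false]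
  rw [show (cur ++ ['r']).length = cur.length + 1 from by simp]
  rw [replace_go_no_r cur h _ [] (by simp)]
  simp

lemma decVal_append (cur : List Char) (c : Char) :
    decVal (cur ++ [c]) = 10 * decVal cur + ((c.toNat : Int) - 48) := by
  simp [decVal]

-- the fused per-string pass computes what tokenise-then-accumulate computes
lemma main_inner (cs : List Char) : ∀ (cur : List Char) (k : Nat) (t0 t1 : Int),
    cur.all PySem.Chars.isdigit = true →
    goodChars cs (!cur.isEmpty) = true →
    inner_go (ea_go cs [] cur) k t0 t1 =
      (cs.foldl alt_step ((t0, t1), (k % 2, decVal cur))).1 := by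
  induction cs with
  | nil => intro cur k t0 t1 _ _; simp [ea_go, inner_go]
  | cons c rest ih =>
    intro cur k t0 t1 hdig hgood
    by_cases h1 : c = 'a' ∨ c = 'c' ∨ c = 'f'
    · have hgood' : goodChars rest false = true := by
        simpa [goodChars, h1] using hgood
      have hea : ea_go (c :: rest) [] cur = [[c]] ++ ea_go rest [] [] := by
        simp only [ea_go, if_pos h1]; exact ea_go_acc rest [[c]] []
      rw [hea]
      have hstep : ∀ (u0 u1 : Int), inner_go (ea_go rest [] []) (k + 1) u0 u1 =
          (rest.foldl alt_step ((u0, u1), ((k + 1) % 2, 0))).1 := by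
        intro u0 u1
        simpa [decVal] using ih [] (k + 1) u0 u1 (by simp) (by simpa using hgood')
      have hina : PySem.Chars.isIn ['r'] ['a'] = false := by decide
      have hinf : PySem.Chars.isIn ['r'] ['f'] = false := by decide
      rcases h1 with h | h | h <;> subst h <;>
        rcases Nat.mod_two_eq_zero_or_one k with hk | hk <;>
          simp [inner_go, alt_step, hk, List.foldl_cons, hstep, hina, hinf,
                Nat.add_mod, decVal]
    · by_cases h2 : PySem.Chars.isdigit c = true
      · have hr : c ≠ 'r' := by
          intro h; rw [h] at h2; exact absurd h2 (by decide)
        have hea : ea_go (c :: rest) [] cur = ea_go rest [] (cur ++ [c]) := by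
          simp [ea_go, h1, h2]
        have hgood' : goodChars rest true = true := by
          simpa [goodChars, h1, h2] using hgood
        have ha : c ≠ 'a' := by rintro rfl; exact h1 (Or.inl rfl)
        have hc : c ≠ 'c' := by rintro rfl; exact h1 (Or.inr (Or.inl rfl))
        have hf : c ≠ 'f' := by rintro rfl; exact h1 (Or.inr (Or.inr rfl))
        rw [hea, ih (cur ++ [c]) k t0 t1 (by simp_all)
          (by rw [show (!(cur ++ [c]).isEmpty) = true from by simp]; exact hgood')]
        have hdv : decVal (cur ++ [c]) = decVal cur * 10 + ((c.toNat : Int) - 48) := by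
          rw [decVal_append]; ring
        simp only [List.foldl_cons, alt_step, if_neg ha, if_neg hc, if_neg hf, if_neg hr,
          if_pos h2, hdv]
      · by_cases h3 : c = 'r'
        · subst h3
          have hcur : cur.isEmpty = false := by
            rcases hgood4 : cur.isEmpty with _ | _
            · rfl
            · rw [show (!cur.isEmpty) = false from by simp [hgood4]] at hgood
              simp [goodChars, h2] at hgood
          have hne : cur ≠ [] := by simpa [List.isEmpty_iff] using hcur
          have hgood' : goodChars rest false = true := by
            have := hgood
            simp [goodChars, h2, hcur] at this
            exact this
          have hea : ea_go ('r' :: rest) [] cur = [cur ++ ['r']] ++ ea_go rest [] [] := by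
            simp only [ea_go, if_neg h1, if_neg h2]
            exact ea_go_acc rest [cur ++ ['r']] []
          rw [hea]
          have hnotc : cur ++ ['r'] ≠ ['c'] := by
            intro heq
            have := congrArg List.length heq
            simp at this
            exact hne this
          have hisin : PySem.Chars.isIn ['r'] (cur ++ ['r']) = true := by
            rw [PySem.Chars.isIn_iff_infix]
            exact (List.suffix_append cur ['r']).isInfix
          have hnor : 'r' ∉ cur := by
            intro hm
            have := List.all_eq_true.mp hdig 'r' hm
            exact absurd this (by decide)
          have hrep : pyIntDigits? (PySem.Chars.replace (cur ++ ['r']) ['r'] []) = some (decVal cur) := by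
            rw [replace_r cur hnor, pyIntDigits?, if_pos ⟨hne, hdig⟩]
          have hstep : ∀ (u0 u1 : Int), inner_go (ea_go rest [] []) (k + 1) u0 u1 =
              (rest.foldl alt_step ((u0, u1), ((k + 1) % 2, 0))).1 := by
            intro u0 u1
            simpa [decVal] using ih [] (k + 1) u0 u1 (by simp) (by simpa using hgood')
          rcases Nat.mod_two_eq_zero_or_one k with hk | hk <;>
            simp [inner_go, alt_step, hk, hnotc, hisin, hrep, hstep, Nat.add_mod]
        · have hea : ea_go (c :: rest) [] cur = ea_go rest [] cur := by
            simp [ea_go, h1, h2, h3]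
          have hgood' : goodChars rest (!cur.isEmpty) = true := by
            simpa [goodChars, h1, h2, h3] using hgood
          have ha : c ≠ 'a' := by rintro rfl; exact h1 (Or.inl rfl)
          have hc : c ≠ 'c' := by rintro rfl; exact h1 (Or.inr (Or.inl rfl))
          have hf : c ≠ 'f' := by rintro rfl; exact h1 (Or.inr (Or.inr rfl))
          rw [hea, ih cur k t0 t1 hdig hgood']
          simp only [List.foldl_cons, alt_step, if_neg ha, if_neg hc, if_neg hf, if_neg h3,
            if_neg h2]

lemma per_string (h : String) (hg : goodChars h.toList false = true) :
    inner_go (extract_actions h) 0 0 0 = (h.toList.foldl alt_step ((0, 0), (0, 0))).1 := by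
  have := main_inner h.toList [] 0 0 0 (by simp) (by simpa using hg)
  simpa [extract_actions, decVal] using this

lemma outer (ah : List String) : ∀ (acc : Int × Int),
    (∀ s ∈ ah, goodChars s.toList false = true) →
    ah.foldl (fun acc history =>
        let t := inner_go (extract_actions history) 0 0 0
        (acc.1 + t.1, acc.2 + t.2)) acc =
    ah.foldl (fun acc history =>
        let r := history.toList.foldl alt_step ((0, 0), (0, 0))
        (acc.1 + r.1.1, acc.2 + r.1.2)) acc := by
  induction ah with
  | nil => intro acc _; rfl
  | cons h t ih =>
    intro acc hg
    simp only [List.foldl_cons]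
    rw [per_string h (hg h (by simp))]
    exact ih _ (fun s hs => hg s (List.mem_cons_of_mem _ hs))

-- ===== VERDICT (by name: the statement is the Claim_ definition above) =====
theorem player_money_bet_spec : Claim_equal_player_money_bet := by
  intro ah _ hpre
  unfold Spec_player_money_bet player_money_bet player_money_bet_alt
  exact outer ah (0, 0) hpre
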